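-- pv_equiv track=rewrite | github.com/batamorphism/Coding | Python/AtCoder/old/abc222_e_1017.py | solve
-- ===== SOURCE A (Python) =====
-- mod = 998244353
--
-- def solve(edge_cnt, k):
--     # 各辺に+1, -1を付けたときの総和がkとなる組み合わせ
--     # 各辺に+2, 0を付けたときの総和がk+nとなる組み合わせ(nは要素合計)
--     # ナップザックDP
--     # DP[i][s] edge_cntのi番目まで見たときの総和がsとなる組み合わせ数
--     n = sum(edge_cnt)
--     if n+k < 0:  # kは負値をとれるので注意
--         return 0
--     DP = [0]*(n+k+1)  # 添え字iを付けると遅くなるので注意。メモリ節約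
--     DP[0] = 1
--     for val in edge_cnt:
--         for s in range(n+k, -1, -1):
--             if s-val*2 < 0:
--                 continue
--             DP[s] += DP[s-val*2]
--             DP[s] %= mod
--     return DP[n+k]
-- ===== SOURCE B (Python) =====
-- mod = 998244353
--
-- def solve(edge_cnt, k):
--     # Divide and conquer: count doubled subset sums of each half recursively,
--     # then convolve the two halves' sum->count tables.
--     n = sum(edge_cnt)
--     target = n + k
--     if target < 0:
--         return 0
--     return table(edge_cnt).get(target, 0)
--
-- def table(vals):
--     if not vals:
--         return {0: 1}
--     if len(vals) == 1:
--         d = {0: 1}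
--         t = 2 * vals[0]
--         d[t] = (d.get(t, 0) + 1) % mod
--         return d
--     h = len(vals) // 2
--     return convolve(table(vals[:h]), table(vals[h:]))
--
-- def convolve(d1, d2):
--     res = {}
--     for s1, c1 in d1.items():
--         for s2, c2 in d2.items():
--             t = s1 + s2
--             res[t] = (res.get(t, 0) + c1 * c2) % mod
--     return res
-- ===== Notes on version B (the rewrite author's own statement) =====
-- stated objective: alternative
-- what changed: Replaces the sequential in-place backward array DP (one pass per element over the whole index range) with a divide-and-conquer scheme: recursively build sparse sum->count tables for the two halves of the list and combine them by convolving the tables.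
import Mathlib
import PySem

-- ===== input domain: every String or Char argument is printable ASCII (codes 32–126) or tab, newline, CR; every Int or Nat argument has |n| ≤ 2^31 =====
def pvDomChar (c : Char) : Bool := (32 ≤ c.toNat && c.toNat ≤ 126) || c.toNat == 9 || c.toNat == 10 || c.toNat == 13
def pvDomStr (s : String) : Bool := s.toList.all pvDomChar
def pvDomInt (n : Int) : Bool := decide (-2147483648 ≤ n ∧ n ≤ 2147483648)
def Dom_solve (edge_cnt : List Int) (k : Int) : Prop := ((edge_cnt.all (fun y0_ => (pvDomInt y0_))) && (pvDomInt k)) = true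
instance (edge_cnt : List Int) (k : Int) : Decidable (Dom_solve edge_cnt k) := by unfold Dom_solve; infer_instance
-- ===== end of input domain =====

-- B replaces A's sequential in-place backward array DP by divide and conquer: it recursively
-- builds sparse sum->count tables for the two halves of the list and convolves them (alternative).

def pvMod : Int := 998244353

-- ===== PORT A =====
-- inner-loop body: 'if s-val*2 < 0: continue; DP[s] += DP[s-val*2]; DP[s] %= mod'
-- (reads ported with getD, exact while indices are in range, which Pre_solve guarantees)
def pvStepA (val : Int) (dp : Array Int) (s : Int) : Array Int :=
  if s - val * 2 < 0 then dp
  else dp.set! s.toNat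
    (PySem.Int.mod (dp.getD s.toNat 0 + dp.getD (s - val * 2).toNat 0) pvMod)

def solve (edge_cnt : List Int) (k : Int) : Int :=
  let n := edge_cnt.sum
  if n + k < 0 then 0
  else
    let dp0 : Array Int := (Array.replicate (n + k + 1).toNat (0 : Int)).set! 0 1
    let dp := edge_cnt.foldl
      (fun dp val => (PySem.List.pyRange (n + k) (-1) (-1)).foldl (pvStepA val) dp) dp0
    dp.getD (n + k).toNat 0

-- ===== PORT B =====
-- 'res[t] = (res.get(t, 0) + c1 * c2) % mod' for one pair (s2, c2) of d2
def pvConvStep (s1 c1 : Int) (res : PySem.Dict Int Int) (p2 : Int × Int) : PySem.Dict Int Int :=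
  let t := s1 + p2.1
  res.insert t (PySem.Int.mod (res.getD t 0 + c1 * p2.2) pvMod)

-- 'def convolve(d1, d2)' of Source B
def pvConvolve (d1 d2 : PySem.Dict Int Int) : PySem.Dict Int Int :=
  d1.items.foldl (fun res p1 => d2.items.foldl (pvConvStep p1.1 p1.2) res) PySem.Dict.empty

-- 'def table(vals)' of Source B
def pvTable : List Int → PySem.Dict Int Int
  | [] => (PySem.Dict.empty : PySem.Dict Int Int).insert 0 1
  | [v] =>
      let d := (PySem.Dict.empty : PySem.Dict Int Int).insert 0 1
      let t := 2 * v
      d.insert t (PySem.Int.mod (d.getD t 0 + 1) pvMod)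
  | v1 :: v2 :: rest =>
      let l := v1 :: v2 :: rest
      pvConvolve (pvTable (l.take (l.length / 2))) (pvTable (l.drop (l.length / 2)))
termination_by l => l.length
decreasing_by
  · simp [List.length_take]; omega
  · simp [List.length_drop]; omega

def solve_alt (edge_cnt : List Int) (k : Int) : Int :=
  let n := edge_cnt.sum
  let target := n + k
  if target < 0 then 0
  else (pvTable edge_cnt).getD target 0

-- ===== PRECONDITION & SPEC =====
-- Pre_ excludes exactly the inputs on which A raises IndexError: when n+k >= 0, a negative
-- element makes DP[s-val*2] index past the end of the array.  (If n+k < 0, A returns 0 first.)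
def Pre_solve (edge_cnt : List Int) (k : Int) : Prop :=
  edge_cnt.sum + k < 0 ∨ ∀ v ∈ edge_cnt, 0 ≤ v
instance (edge_cnt : List Int) (k : Int) : Decidable (Pre_solve edge_cnt k) := by
  unfold Pre_solve; infer_instance

def pvWitness_solve : List Int × Int := ([1, 2], 1)

def Spec_solve (edge_cnt : List Int) (k : Int) (out : Int) : Prop := out = solve_alt edge_cnt k
instance (edge_cnt : List Int) (k : Int) (out : Int) : Decidable (Spec_solve edge_cnt k out) := by
  unfold Spec_solve; infer_instance

-- ===== CLAIM (what is proved, stated in full; the proofs are below) =====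
def Claim_equal_solve : Prop := ∀ (edge_cnt : List Int) (k : Int),
  Dom_solve edge_cnt k → Pre_solve edge_cnt k → Spec_solve edge_cnt k (solve edge_cnt k)

-- ===== LEMMAS AND PROOFS =====

-- pvC p s = the number of subsets S of p with 2*sum(S) = s; both ports compute pvC … % pvMod
def pvC : List Int → Int → Int
  | [], s => if s = 0 then 1 else 0
  | v :: vs, s => pvC vs s + pvC vs (s - 2 * v)

lemma pvMod_pos : (0:Int) < pvMod := by norm_num [pvMod]

lemma pvmod_eq (x : Int) : PySem.Int.mod x pvMod = x % pvMod :=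
  PySem.Int.mod_eq_emod_of_pos pvMod_pos


def pvUpdA (v : Int) (a : List Int) (i : Nat) : Int :=
  if (i:Int) - v * 2 < 0 then a.getD i 0
  else (a.getD i 0 + a.getD ((i:Int) - v * 2).toNat 0) % pvMod

-- list-level model of pvStepA (same branches; Array.set!/getD mirrored on toList)
def pvStepL (val : Int) (dp : List Int) (s : Int) : List Int :=
  if s - val * 2 < 0 then dp
  else dp.set s.toNat ((dp.getD s.toNat 0 + dp.getD (s - val * 2).toNat 0) % pvMod)

lemma pvArr_getD (a : Array Int) (i : Nat) (d : Int) : a.getD i d = a.toList.getD i d := by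
  unfold Array.getD
  split
  all_goals rename_i h
  · rw [List.getD_eq_getElem _ _ (by simpa using h)]
    simp
  · rw [List.getD_eq_default]
    simp; omega

lemma pvStepA_toList (v : Int) (a : Array Int) (s : Int) :
    (pvStepA v a s).toList = pvStepL v a.toList s := by
  unfold pvStepA pvStepL
  split
  · rfl
  · simp [Array.set!, pvmod_eq]

lemma pvFoldA_toList (v : Int) : ∀ (l : List Int) (a : Array Int),
    (l.foldl (pvStepA v) a).toList = l.foldl (pvStepL v) a.toList := by
  intro l
  induction l with
  | nil => intro a; rfl
  | cons x l ih => intro a; simp only [List.foldl_cons]; rw [ih, pvStepA_toList]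

lemma pvStepL_length (v : Int) (a : List Int) (s : Int) : (pvStepL v a s).length = a.length := by
  unfold pvStepL; split <;> simp

lemma pvStepL_getD (v : Int) (_hv : 0 ≤ v) (a : List Int) (m : Nat) (hm : m < a.length) (i : Nat) :
    (pvStepL v a (m:Int)).getD i 0 = if i = m then pvUpdA v a m else a.getD i 0 := by
  unfold pvStepL pvUpdA
  by_cases hc : (m:Int) - v * 2 < 0
  · simp only [if_pos hc]
    split <;> simp_all
  · simp only [if_neg hc]
    have hs : ((m:Int)).toNat = m := by omega
    rw [hs]
    rcases eq_or_ne i m with rfl | hne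
    · simp [List.getD, hm]
    · simp [List.getD, List.getElem?_set_ne (by omega : m ≠ i), hne]

lemma pvInnerA (v : Int) (hv : 0 ≤ v) : ∀ (m : Nat) (a : List Int), m < a.length →
    ∀ i : Nat, ((PySem.List.pyRange (m:Int) (-1) (-1)).foldl (pvStepL v) a).getD i 0
      = if i ≤ m then pvUpdA v a i else a.getD i 0 := by
  intro m
  induction m with
  | zero =>
    intro a ha i
    rw [PySem.List.pyRange_neg_one_cons (by norm_num)]
    have : PySem.List.pyRange ((0:Nat) - 1 : Int) (-1) (-1) = [] := by
      rw [PySem.List.pyRange_neg_one_eq_nil (by norm_num)]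
    rw [show ((0:Nat):Int) - 1 = -1 by norm_num] at *
    rw [PySem.List.pyRange_neg_one_eq_nil (by norm_num)]
    simp only [List.foldl_cons, List.foldl_nil]
    rw [pvStepL_getD v hv a 0 ha i]
    simp only [Nat.le_zero]
    split <;> simp_all
  | succ m ih =>
    intro a ha i
    rw [PySem.List.pyRange_neg_one_cons (by omega : (-1:Int) < ((m+1:Nat):Int))]
    have hcast : ((m+1:Nat):Int) - 1 = (m:Nat) := by push_cast; ring
    rw [hcast]
    simp only [List.foldl_cons]
    set a1 := pvStepL v a ((m+1:Nat):Int) with ha1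
    have hlen1 : a1.length = a.length := pvStepL_length v a _
    have hstep := pvStepL_getD v hv a (m+1) ha
    have hia1 : ∀ j : Nat, j ≠ m+1 → a1.getD j 0 = a.getD j 0 := by
      intro j hj
      rw [ha1, hstep j, if_neg hj]
    rw [ih a1 (by omega)]
    by_cases hi : i ≤ m
    · rw [if_pos hi, if_pos (by omega)]
      unfold pvUpdA
      by_cases hc : (i:Int) - v * 2 < 0
      · rw [if_pos hc, if_pos hc, hia1 i (by omega)]
      · rw [if_neg hc, if_neg hc]
        have htn : ((i:Int) - v * 2).toNat ≠ m + 1 := by omega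
        rw [hia1 i (by omega), hia1 _ htn]
    · rw [if_neg hi]
      by_cases hi1 : i = m + 1
      · subst hi1
        rw [if_pos (le_refl _), ha1, hstep, if_pos rfl]
      · rw [if_neg (by omega), hia1 i hi1]

lemma pvC_append (p : List Int) (v s : Int) :
    pvC (p ++ [v]) s = pvC p s + pvC p (s - 2 * v) := by
  induction p generalizing s with
  | nil => simp [pvC]
  | cons w p ih =>
    simp only [List.cons_append, pvC, ih]
    have h : s - 2 * w - 2 * v = s - 2 * v - 2 * w := by ring
    rw [h]; ring

lemma pvC_neg (p : List Int) (hp : ∀ v ∈ p, 0 ≤ v) (s : Int) (hs : s < 0) : pvC p s = 0 := by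
  induction p generalizing s with
  | nil => simp [pvC]; omega
  | cons v vs ih =>
    have hv := hp v (by simp)
    simp only [pvC]
    rw [ih (fun w hw => hp w (by simp [hw])) s hs,
        ih (fun w hw => hp w (by simp [hw])) (s - 2 * v) (by omega)]
    simp

lemma pvOuterA : ∀ (q P a : List Int) (m : Nat), a.length = m + 1 →
    (∀ v ∈ q, 0 ≤ v) → (∀ v ∈ P, 0 ≤ v) →
    (∀ i : Nat, i ≤ m → a.getD i 0 = pvC P (i:Int) % pvMod) →
    ∀ i : Nat, i ≤ m →
    (q.foldl (fun dp val => (PySem.List.pyRange (m:Int) (-1) (-1)).foldl (pvStepL val) dp) a).getD i 0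
      = pvC (P ++ q) (i:Int) % pvMod := by
  intro q
  induction q with
  | nil => intro P a m _ _ _ hinv i hi; simpa using hinv i hi
  | cons v q ih =>
    intro P a m hlen hq hP hinv i hi
    simp only [List.foldl_cons]
    have hv : 0 ≤ v := hq v (by simp)
    set a1 := (PySem.List.pyRange (m:Int) (-1) (-1)).foldl (pvStepL v) a with ha1
    have hlen1 : a1.length = m + 1 := by
      rw [ha1]
      have : ∀ (l : List Int) (b : List Int), (l.foldl (pvStepL v) b).length = b.length := by
        intro l; induction l with
        | nil => simp
        | cons x l ihl => intro b; simp only [List.foldl_cons]; rw [ihl, pvStepL_length]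
      rw [this, hlen]
    have hinv1 : ∀ i : Nat, i ≤ m → a1.getD i 0 = pvC (P ++ [v]) (i:Int) % pvMod := by
      intro j hj
      rw [ha1, pvInnerA v hv m a (by omega) j, if_pos hj]
      unfold pvUpdA
      rw [pvC_append]
      by_cases hc : (j:Int) - v * 2 < 0
      · rw [if_pos hc, hinv j hj, pvC_neg P hP ((j:Int) - 2 * v) (by omega)]
        simp
      · rw [if_neg hc, hinv j hj]
        have hj2 : ((j:Int) - v * 2).toNat ≤ m := by omega
        rw [hinv _ hj2]
        have hcast : ((((j:Int) - v * 2).toNat : Nat) : Int) = (j:Int) - 2 * v := by omega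
        rw [hcast]
        conv_rhs => rw [Int.add_emod]
    have := ih (P ++ [v]) a1 m hlen1 (fun w hw => hq w (by simp [hw])) (by
      intro w hw
      rcases List.mem_append.mp hw with h | h
      · exact hP w h
      · simp at h; subst h; exact hv) hinv1 i hi
    simpa [List.append_assoc] using this

lemma solveA_char (ec : List Int) (k : Int) (hnn : ∀ v ∈ ec, 0 ≤ v) (h : ¬ (ec.sum + k < 0)) :
    solve ec k = pvC ec (ec.sum + k) % pvMod := by
  unfold solve
  simp only [if_neg h]
  set L := ec.sum + k with hL
  have hL0 : 0 ≤ L := by omega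
  set m := L.toNat with hm
  have hmL : (m:Int) = L := by omega
  have hN : (L + 1).toNat = m + 1 := by omega
  have harr : ∀ (q : List Int) (b : Array Int),
      (q.foldl (fun dp val => (PySem.List.pyRange L (-1) (-1)).foldl (pvStepA val) dp) b).toList
        = q.foldl (fun dp val => (PySem.List.pyRange L (-1) (-1)).foldl (pvStepL val) dp) b.toList := by
    intro q
    induction q with
    | nil => intro b; rfl
    | cons x q ihq => intro b; simp only [List.foldl_cons]; rw [ihq, pvFoldA_toList]
  rw [pvArr_getD, harr]
  have hd0 : ((Array.replicate (L + 1).toNat (0:Int)).set! 0 1).toList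
      = (List.replicate (L + 1).toNat (0:Int)).set 0 1 := by
    simp [Array.set!]
  rw [hd0]
  set a0 : List Int := (List.replicate (L + 1).toNat (0:Int)).set 0 1 with ha0
  have hlen : a0.length = m + 1 := by simp [ha0, hN]
  have hinv0 : ∀ i : Nat, i ≤ m → a0.getD i 0 = pvC [] (i:Int) % pvMod := by
    intro i hi
    rcases Nat.eq_zero_or_pos i with rfl | hpos
    · rw [ha0]
      simp only [List.getD]
      rw [List.getElem?_set_self (by simp [hN])]
      norm_num [pvC, pvMod]
    · rw [ha0]
      simp only [List.getD]
      rw [List.getElem?_set_ne (by omega : (0:Nat) ≠ i), List.getElem?_replicate,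
          if_pos (by omega : i < (L+1).toNat)]
      simp only [pvC]
      rw [if_neg (by omega : ¬ ((i:Nat):Int) = 0)]
      simp
  rw [← hmL]
  simpa using pvOuterA ec [] a0 m hlen hnn (by simp) hinv0 m (le_refl m)

-- ===== B-side lemmas =====

def pvLk : List (Int × Int) → Int → Int
  | [], _ => 0
  | (s, c) :: rest, x => if x = s then c else pvLk rest x

lemma pvLk_of_mem {l : List (Int × Int)} {x v : Int} (h : (x, v) ∈ l)
    (hnd : (l.map Prod.fst).Nodup) : pvLk l x = v := by
  induction l with
  | nil => simp at h
  | cons p rest ih =>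
    obtain ⟨s, c⟩ := p
    simp only [List.map_cons, List.nodup_cons] at hnd
    rcases List.mem_cons.mp h with h1 | h1
    · simp only [Prod.mk.injEq] at h1
      simp [pvLk, h1.1, h1.2]
    · have hx : x ≠ s := by
        rintro rfl
        exact hnd.1 (by simpa using List.mem_map_of_mem (f := Prod.fst) h1)
      simp [pvLk, hx, ih h1 hnd.2]

lemma pvLk_of_not_mem {l : List (Int × Int)} {x : Int} (h : x ∉ l.map Prod.fst) :
    pvLk l x = 0 := by
  induction l with
  | nil => rfl
  | cons p rest ih =>
    obtain ⟨s, c⟩ := p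
    simp only [List.map_cons, List.mem_cons] at h
    simp only [not_or] at h
    simp [pvLk, h.1, ih h.2]

lemma pvGetD_eq_pvLk (d : PySem.Dict Int Int) (hnd : d.keys.Nodup) (x : Int) :
    d.getD x 0 = pvLk d.items x := by
  by_cases hx : x ∈ d.keys
  · have hkeys : d.keys = d.items.map Prod.fst := by
      simp [PySem.Dict.keys]
    rw [hkeys] at hx hnd
    rcases List.mem_map.mp hx with ⟨⟨a, b⟩, hab, rfl⟩
    rw [pvLk_of_mem hab hnd]
    exact PySem.Dict.getD_of_mem_items d hab (by rw [PySem.Dict.keys]; exact hnd) 0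
  · rw [PySem.Dict.getD_of_not_contains d 0 (by
      rw [Bool.eq_false_iff]
      intro hc
      exact hx ((PySem.Dict.contains_iff_mem_keys d x).mp hc))]
    rw [pvLk_of_not_mem (by
      intro hm
      apply hx
      rw [show d.keys = d.items.map Prod.fst by simp [PySem.Dict.keys]]
      exact hm)]

-- nonnegativity / positivity of the counting function
lemma pvC_nonneg : ∀ (l : List Int) (s : Int), 0 ≤ pvC l s := by
  intro l
  induction l with
  | nil => intro s; simp only [pvC]; split <;> norm_num
  | cons v vs ih => intro s; simp only [pvC]; have := ih s; have := ih (s - 2 * v); omega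

lemma pvSum_nonneg {L : List Int} (h : ∀ x ∈ L, 0 ≤ x) : 0 ≤ L.sum := by
  induction L with
  | nil => simp
  | cons a L ih =>
    simp only [List.sum_cons]
    have := h a (by simp)
    have := ih (fun x hx => h x (by simp [hx]))
    omega

lemma pvSum_pos_iff {L : List Int} (h : ∀ x ∈ L, 0 ≤ x) :
    0 < L.sum ↔ ∃ x ∈ L, 0 < x := by
  induction L with
  | nil => simp
  | cons a L ih =>
    simp only [List.sum_cons, List.mem_cons]
    have ha := h a (by simp)
    have hL : ∀ x ∈ L, 0 ≤ x := fun x hx => h x (by simp [hx])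
    have hs := pvSum_nonneg hL
    constructor
    · intro hpos
      by_cases hap : 0 < a
      · exact ⟨a, Or.inl rfl, hap⟩
      · rcases (ih hL).mp (by omega) with ⟨x, hx, hxp⟩
        exact ⟨x, Or.inr hx, hxp⟩
    · rintro ⟨x, hx | hx, hxp⟩
      · omega
      · have := (ih hL).mpr ⟨x, hx, hxp⟩; omega

-- picking a single term out of an indicator sum
lemma pvSum_pick (f : Int → Int) (x : Int) : ∀ (L : List Int), L.Nodup → x ∈ L →
    (L.map (fun s => (if s = x then 1 else 0) * f s)).sum = f x := by
  intro L
  induction L with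
  | nil => intro _ h; simp at h
  | cons a L ih =>
    intro hnd hx
    simp only [List.nodup_cons] at hnd
    simp only [List.map_cons, List.sum_cons]
    by_cases hax : a = x
    · subst hax
      rw [if_pos rfl, one_mul]
      have hz : (L.map (fun s => (if s = a then 1 else 0) * f s)).sum = 0 := by
        have hall : ∀ s ∈ L, (if s = a then (1:Int) else 0) * f s = 0 := by
          intro s hs
          rw [if_neg (by rintro rfl; exact hnd.1 hs), zero_mul]
        calc (L.map (fun s => (if s = a then (1:Int) else 0) * f s)).sum
            = (L.map (fun _ => (0:Int))).sum := by
              rw [List.map_congr_left hall]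
          _ = 0 := by simp
      omega
    · rcases List.mem_cons.mp hx with h | hx
      · exact absurd h.symm hax
      · rw [if_neg hax, zero_mul, zero_add, ih hnd.2 hx]

-- the convolution identity for pvC, summed over any list covering the support of p
lemma pvC_conv (q : List Int) : ∀ (p : List Int) (t : Int) (L : List Int), L.Nodup →
    (∀ s, 0 < pvC p s → s ∈ L) →
    pvC (p ++ q) t = (L.map (fun s => pvC p s * pvC q (t - s))).sum := by
  intro p
  induction p with
  | nil =>
    intro t L hnd hcov
    have h0 : (0:Int) ∈ L := hcov 0 (by simp [pvC])
    simp only [List.nil_append]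
    have : (L.map (fun s => pvC [] s * pvC q (t - s))).sum
        = (L.map (fun s => (if s = 0 then 1 else 0) * pvC q (t - s))).sum := by
      congr 1
    rw [this, pvSum_pick (fun s => pvC q (t - s)) 0 L hnd h0]
    simp
  | cons v p' ih =>
    intro t L hnd hcov
    have hcov' : ∀ s, 0 < pvC p' s → s ∈ L := by
      intro s hs
      apply hcov
      simp only [pvC]
      have := pvC_nonneg p' (s - 2 * v)
      omega
    have hcov2 : ∀ s, 0 < pvC p' s → s ∈ L.map (fun x => x - 2 * v) := by
      intro s hs
      have : s + 2 * v ∈ L := by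
        apply hcov
        simp only [pvC]
        have h1 : pvC p' (s + 2 * v - 2 * v) = pvC p' s := by ring_nf
        have := pvC_nonneg p' (s + 2 * v)
        omega
      exact List.mem_map.mpr ⟨s + 2 * v, this, by ring⟩
    have hnd2 : (L.map (fun x => x - 2 * v)).Nodup :=
      hnd.map (fun a b h => by omega)
    have h1 : pvC ((v :: p') ++ q) t = pvC (p' ++ q) t + pvC (p' ++ q) (t - 2 * v) := by
      simp [pvC]
    rw [h1, ih t L hnd hcov', ih (t - 2 * v) _ hnd2 hcov2]
    rw [List.map_map]
    have hfun : ((fun s => pvC p' s * pvC q (t - 2 * v - s)) ∘ (fun x => x - 2 * v))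
        = fun s => pvC p' (s - 2 * v) * pvC q (t - s) := by
      funext s
      simp only [Function.comp]
      congr 2
      ring
    rw [hfun]
    rw [← PySem.List.sum_map_add_int]
    congr 1
    apply List.map_congr_left
    intro s _
    simp only [pvC]
    ring

-- the inner indicator sum: total weight L2 contributes at slot t for a fixed s1
def pvS2 (s1 : Int) (L2 : List (Int × Int)) (t : Int) : Int :=
  (L2.map (fun p2 => if t = s1 + p2.1 then p2.2 else 0)).sum

-- the double indicator sum: total weight all pairs of L1 × L2 contribute at slot t
def pvS1 (L1 L2 : List (Int × Int)) (t : Int) : Int :=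
  (L1.map (fun p1 => p1.2 * pvS2 p1.1 L2 t)).sum

lemma pvadd_eml (a b m : Int) : (a % m + b) % m = (a + b) % m := by
  conv_rhs => rw [Int.add_emod]
  rw [Int.add_emod (a % m) b, Int.emod_emod_of_dvd _ (dvd_refl m)]

lemma pvSum_emod_congr {α : Type} (m : Int) (f g : α → Int) : ∀ (L : List α),
    (∀ a ∈ L, f a % m = g a % m) → (L.map f).sum % m = (L.map g).sum % m := by
  intro L
  induction L with
  | nil => intro _; rfl
  | cons a L ih =>
    intro h
    simp only [List.map_cons, List.sum_cons]
    rw [Int.add_emod, h a (by simp), ih (fun x hx => h x (by simp [hx])), ← Int.add_emod]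

lemma pvSum_items_pick (x : Int) : ∀ (L : List (Int × Int)), (L.map Prod.fst).Nodup →
    (L.map (fun p => if x = p.1 then p.2 else 0)).sum = pvLk L x := by
  intro L
  induction L with
  | nil => intro _; rfl
  | cons p L ih =>
    intro hnd
    obtain ⟨s, c⟩ := p
    simp only [List.map_cons, List.nodup_cons] at hnd
    simp only [List.map_cons, List.sum_cons, pvLk]
    by_cases hx : x = s
    · subst hx
      rw [if_pos rfl, if_pos rfl]
      have hz : (L.map (fun p => if x = p.1 then p.2 else 0)).sum = 0 := by
        rw [List.map_congr_left (fun p hp => by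
          rw [if_neg (by
            intro hc
            exact hnd.1 (by rw [hc]; exact List.mem_map_of_mem (f := Prod.fst) hp))]
          )]
        simp
      omega
    · rw [if_neg hx, if_neg hx, zero_add, ih hnd.2]

-- inner fold of pvConvolve: keys, nodup, bounds, value mod pvMod
lemma pvInner_keys (s1 c1 : Int) : ∀ (L2 : List (Int × Int)) (res : PySem.Dict Int Int) (t : Int),
    t ∈ (L2.foldl (pvConvStep s1 c1) res).keys ↔ t ∈ res.keys ∨ ∃ p2 ∈ L2, t = s1 + p2.1 := by
  intro L2
  induction L2 with
  | nil => intro res t; simp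
  | cons p2 L2 ih =>
    intro res t
    simp only [List.foldl_cons]
    rw [ih]
    unfold pvConvStep
    rw [PySem.Dict.mem_keys_insert]
    constructor
    · rintro (⟨h | h⟩ | ⟨q, hq, rfl⟩)
      · exact Or.inr ⟨p2, by simp, h⟩
      · exact Or.inl h
      · exact Or.inr ⟨q, by simp [hq], rfl⟩
    · rintro (h | ⟨q, hq, rfl⟩)
      · exact Or.inl (Or.inr h)
      · rcases List.mem_cons.mp hq with rfl | hq
        · exact Or.inl (Or.inl rfl)
        · exact Or.inr ⟨q, hq, rfl⟩

lemma pvInner_nodup (s1 c1 : Int) : ∀ (L2 : List (Int × Int)) (res : PySem.Dict Int Int),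
    res.keys.Nodup → (L2.foldl (pvConvStep s1 c1) res).keys.Nodup := by
  intro L2
  induction L2 with
  | nil => intro res h; simpa using h
  | cons p2 L2 ih =>
    intro res h
    simp only [List.foldl_cons]
    exact ih _ (PySem.Dict.nodup_keys_insert _ _ _ h)

lemma pvInner_bounds (s1 c1 : Int) : ∀ (L2 : List (Int × Int)) (res : PySem.Dict Int Int),
    (∀ t : Int, 0 ≤ res.getD t 0 ∧ res.getD t 0 < pvMod) →
    ∀ t : Int, 0 ≤ (L2.foldl (pvConvStep s1 c1) res).getD t 0 ∧
      (L2.foldl (pvConvStep s1 c1) res).getD t 0 < pvMod := by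
  intro L2
  induction L2 with
  | nil => intro res h t; exact h t
  | cons p2 L2 ih =>
    intro res h
    apply ih
    intro t
    unfold pvConvStep
    rw [PySem.Dict.getD_insert]
    split
    · rw [pvmod_eq]
      exact ⟨Int.emod_nonneg _ (by have := pvMod_pos; omega), Int.emod_lt_of_pos _ pvMod_pos⟩
    · exact h t

lemma pvInner_getD (s1 c1 : Int) : ∀ (L2 : List (Int × Int)) (res : PySem.Dict Int Int) (t : Int),
    (L2.foldl (pvConvStep s1 c1) res).getD t 0 % pvMod
      = (res.getD t 0 + c1 * pvS2 s1 L2 t) % pvMod := by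
  intro L2
  induction L2 with
  | nil => intro res t; simp [pvS2]
  | cons p2 L2 ih =>
    intro res t
    simp only [List.foldl_cons]
    rw [ih]
    unfold pvConvStep
    rw [PySem.Dict.getD_insert, pvmod_eq]
    simp only [pvS2, List.map_cons, List.sum_cons]
    by_cases ht : t = s1 + p2.1
    · subst ht
      rw [if_pos rfl, if_pos rfl, pvadd_eml]
      ring_nf
    · rw [if_neg ht, if_neg ht, zero_add]

-- outer fold of pvConvolve
lemma pvOuter_keys (L2 : List (Int × Int)) : ∀ (L1 : List (Int × Int))
    (res : PySem.Dict Int Int) (t : Int),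
    t ∈ (L1.foldl (fun res p1 => L2.foldl (pvConvStep p1.1 p1.2) res) res).keys ↔
      t ∈ res.keys ∨ ∃ p1 ∈ L1, ∃ p2 ∈ L2, t = p1.1 + p2.1 := by
  intro L1
  induction L1 with
  | nil => intro res t; simp
  | cons p1 L1 ih =>
    intro res t
    simp only [List.foldl_cons]
    rw [ih, pvInner_keys]
    constructor
    · rintro (⟨h | ⟨q, hq, rfl⟩⟩ | ⟨q1, hq1, q2, hq2, rfl⟩)
      · exact Or.inl h
      · exact Or.inr ⟨p1, by simp, q, hq, rfl⟩
      · exact Or.inr ⟨q1, by simp [hq1], q2, hq2, rfl⟩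
    · rintro (h | ⟨q1, hq1, q2, hq2, rfl⟩)
      · exact Or.inl (Or.inl h)
      · rcases List.mem_cons.mp hq1 with rfl | hq1
        · exact Or.inl (Or.inr ⟨q2, hq2, rfl⟩)
        · exact Or.inr ⟨q1, hq1, q2, hq2, rfl⟩

lemma pvOuter_nodup (L2 : List (Int × Int)) : ∀ (L1 : List (Int × Int))
    (res : PySem.Dict Int Int), res.keys.Nodup →
    (L1.foldl (fun res p1 => L2.foldl (pvConvStep p1.1 p1.2) res) res).keys.Nodup := by
  intro L1
  induction L1 with
  | nil => intro res h; simpa using h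
  | cons p1 L1 ih =>
    intro res h
    simp only [List.foldl_cons]
    exact ih _ (pvInner_nodup _ _ _ _ h)

lemma pvOuter_bounds (L2 : List (Int × Int)) : ∀ (L1 : List (Int × Int))
    (res : PySem.Dict Int Int),
    (∀ t : Int, 0 ≤ res.getD t 0 ∧ res.getD t 0 < pvMod) →
    ∀ t : Int, 0 ≤ (L1.foldl (fun res p1 => L2.foldl (pvConvStep p1.1 p1.2) res) res).getD t 0 ∧
      (L1.foldl (fun res p1 => L2.foldl (pvConvStep p1.1 p1.2) res) res).getD t 0 < pvMod := by
  intro L1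
  induction L1 with
  | nil => intro res h t; exact h t
  | cons p1 L1 ih =>
    intro res h
    exact ih _ (pvInner_bounds _ _ _ _ h)

lemma pvOuter_getD (L2 : List (Int × Int)) : ∀ (L1 : List (Int × Int))
    (res : PySem.Dict Int Int) (t : Int),
    (L1.foldl (fun res p1 => L2.foldl (pvConvStep p1.1 p1.2) res) res).getD t 0 % pvMod
      = (res.getD t 0 + pvS1 L1 L2 t) % pvMod := by
  intro L1
  induction L1 with
  | nil => intro res t; simp [pvS1]
  | cons p1 L1 ih =>
    intro res t
    simp only [List.foldl_cons]
    rw [ih]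
    simp only [pvS1, List.map_cons, List.sum_cons]
    rw [← pvadd_eml, pvInner_getD, pvadd_eml]
    ring_nf

-- the invariant both halves of B maintain: unique keys, keys = achievable sums, values = counts mod
def pvInv (l : List Int) (d : PySem.Dict Int Int) : Prop :=
  d.keys.Nodup ∧ (∀ t : Int, t ∈ d.keys ↔ 0 < pvC l t) ∧
  (∀ t : Int, d.getD t 0 = pvC l t % pvMod)

lemma pvConvolve_getD (d1 d2 : PySem.Dict Int Int) (t : Int) :
    (pvConvolve d1 d2).getD t 0 = pvS1 d1.items d2.items t % pvMod := by
  have hb := pvOuter_bounds d2.items d1.items PySem.Dict.empty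
    (fun t => by rw [PySem.Dict.getD_empty]; exact ⟨le_refl _, pvMod_pos⟩) t
  have hg := pvOuter_getD d2.items d1.items PySem.Dict.empty t
  rw [PySem.Dict.getD_empty, zero_add] at hg
  unfold pvConvolve
  rw [← hg]
  exact (Int.emod_emod_of_dvd _ (dvd_refl _)) ▸ (Int.emod_eq_of_lt hb.1 hb.2).symm

lemma pvConv_inv (p q : List Int) (d1 d2 : PySem.Dict Int Int)
    (h1 : pvInv p d1) (h2 : pvInv q d2) : pvInv (p ++ q) (pvConvolve d1 d2) := by
  obtain ⟨hnd1, hk1, hv1⟩ := h1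
  obtain ⟨hnd2, hk2, hv2⟩ := h2
  have hkeys1 : d1.keys = d1.items.map Prod.fst := by simp [PySem.Dict.keys]
  have hkeys2 : d2.keys = d2.items.map Prod.fst := by simp [PySem.Dict.keys]
  have hconv : ∀ t : Int, pvC (p ++ q) t
      = (d1.keys.map (fun s => pvC p s * pvC q (t - s))).sum := by
    intro t
    exact pvC_conv q p t d1.keys hnd1 (fun s hs => (hk1 s).mpr hs)
  refine ⟨pvOuter_nodup _ _ _ PySem.Dict.nodup_keys_empty, ?_, ?_⟩
  · intro t
    unfold pvConvolve
    rw [pvOuter_keys]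
    simp only [PySem.Dict.keys_empty, List.not_mem_nil, false_or]
    constructor
    · rintro ⟨p1, hp1, p2, hp2, rfl⟩
      have hs1 : p1.1 ∈ d1.keys := by rw [hkeys1]; exact List.mem_map_of_mem hp1
      have hs2 : p2.1 ∈ d2.keys := by rw [hkeys2]; exact List.mem_map_of_mem hp2
      have h1p : 0 < pvC p p1.1 := (hk1 _).mp hs1
      have h2p : 0 < pvC q p2.1 := (hk2 _).mp hs2
      rw [hconv]
      rw [pvSum_pos_iff (by
        intro x hx
        rcases List.mem_map.mp hx with ⟨s, _, rfl⟩
        exact mul_nonneg (pvC_nonneg p s) (pvC_nonneg q (p1.1 + p2.1 - s)))]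
      refine ⟨pvC p p1.1 * pvC q (p1.1 + p2.1 - p1.1),
        List.mem_map_of_mem hs1, ?_⟩
      have : p1.1 + p2.1 - p1.1 = p2.1 := by ring
      rw [this]
      exact mul_pos h1p h2p
    · intro hpos
      rw [hconv, pvSum_pos_iff (by
        intro x hx
        rcases List.mem_map.mp hx with ⟨s, _, rfl⟩
        exact mul_nonneg (pvC_nonneg p s) (pvC_nonneg q (t - s)))] at hpos
      rcases hpos with ⟨x, hx, hxp⟩
      rcases List.mem_map.mp hx with ⟨s, hs, rfl⟩
      have hps : 0 < pvC p s := by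
        rcases lt_or_eq_of_le (pvC_nonneg p s) with h | h
        · exact h
        · rw [← h] at hxp; simp at hxp
      have hqs : 0 < pvC q (t - s) := by
        rcases lt_or_eq_of_le (pvC_nonneg q (t - s)) with h | h
        · exact h
        · rw [← h] at hxp; simp at hxp
      have hts : t - s ∈ d2.keys := (hk2 _).mpr hqs
      rw [hkeys1] at hs
      rcases List.mem_map.mp hs with ⟨p1, hp1, rfl⟩
      rw [hkeys2] at hts
      rcases List.mem_map.mp hts with ⟨p2, hp2, he⟩
      exact ⟨p1, hp1, p2, hp2, by omega⟩
  · intro t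
    rw [pvConvolve_getD]
    have hS2 : ∀ p1 : Int × Int, pvS2 p1.1 d2.items t = pvC q (t - p1.1) % pvMod := by
      intro p1
      unfold pvS2
      have hcong : ∀ p2 ∈ d2.items,
          (if t = p1.1 + p2.1 then p2.2 else 0) = (if t - p1.1 = p2.1 then p2.2 else 0) := by
        intro p2 _
        exact if_congr (by omega) rfl rfl
      rw [List.map_congr_left hcong, pvSum_items_pick _ _ (hkeys2 ▸ hnd2)]
      rw [← pvGetD_eq_pvLk d2 hnd2, hv2]
    have hstep : ∀ p1 ∈ d1.items,
        (p1.2 * pvS2 p1.1 d2.items t) % pvMod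
          = (pvC p p1.1 * pvC q (t - p1.1)) % pvMod := by
      intro p1 hp1
      obtain ⟨s1, c1⟩ := p1
      have hc1 : c1 = pvC p s1 % pvMod := by
        rw [← hv1 s1]
        exact (PySem.Dict.getD_of_mem_items d1 hp1 hnd1 0).symm
      rw [hS2, hc1]
      simp only []
      rw [Int.mul_emod, Int.emod_emod_of_dvd _ (dvd_refl _),
        Int.emod_emod_of_dvd _ (dvd_refl _), ← Int.mul_emod]
    unfold pvS1
    rw [pvSum_emod_congr pvMod _ (fun p1 => pvC p p1.1 * pvC q (t - p1.1)) d1.items hstep]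
    rw [hconv t, hkeys1, List.map_map]
    rfl

lemma pvTable_inv : ∀ (l : List Int), pvInv l (pvTable l) := by
  intro l
  induction l using pvTable.induct with
  | case1 =>
    rw [pvTable]
    refine ⟨PySem.Dict.nodup_keys_insert _ _ _ PySem.Dict.nodup_keys_empty, ?_, ?_⟩
    · intro t
      rw [PySem.Dict.mem_keys_insert]
      simp only [PySem.Dict.keys_empty, List.not_mem_nil, or_false, pvC]
      constructor
      · rintro rfl; norm_num
      · intro h; by_contra hne; rw [if_neg hne] at h; omega
    · intro t
      rw [PySem.Dict.getD_insert]
      simp only [pvC]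
      by_cases ht : t = 0
      · rw [if_pos ht, if_pos ht]; norm_num [pvMod]
      · rw [if_neg ht, if_neg ht, PySem.Dict.getD_empty]; norm_num
  | case2 v =>
    rw [pvTable]
    have hC : ∀ t : Int, pvC [v] t = (if t = 0 then 1 else 0) + (if t = 2 * v then 1 else 0) := by
      intro t
      simp only [pvC]
      congr 1
      by_cases ht : t - 2 * v = 0
      · rw [if_pos ht, if_pos (by omega : t = 2 * v)]
      · rw [if_neg ht, if_neg (by omega : ¬ t = 2 * v)]
    refine ⟨PySem.Dict.nodup_keys_insert _ _ _
      (PySem.Dict.nodup_keys_insert _ _ _ PySem.Dict.nodup_keys_empty), ?_, ?_⟩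
    · intro t
      rw [PySem.Dict.mem_keys_insert, PySem.Dict.mem_keys_insert]
      simp only [PySem.Dict.keys_empty, List.not_mem_nil, or_false, hC]
      constructor
      · rintro (rfl | rfl) <;> split_ifs <;> omega
      · intro h
        by_cases h0 : t = 0
        · exact Or.inr h0
        · left
          by_contra h2
          rw [if_neg h0, if_neg h2] at h
          omega
    · intro t
      rw [hC]
      simp only [PySem.Dict.getD_insert, PySem.Dict.getD_empty, pvmod_eq]
      split_ifs <;> norm_num [pvMod] <;> omega
  | case3 v1 v2 rest l ih1 ih2 =>
    rw [pvTable]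
    have := pvConv_inv _ _ _ _ ih1 ih2
    rwa [List.take_append_drop] at this

lemma solveB_char (ec : List Int) (k : Int) (h : ¬ (ec.sum + k < 0)) :
    solve_alt ec k = pvC ec (ec.sum + k) % pvMod := by
  unfold solve_alt
  simp only [if_neg h]
  exact (pvTable_inv ec).2.2 _

lemma pv_main (ec : List Int) (k : Int)
    (hpre : ec.sum + k < 0 ∨ ∀ v ∈ ec, 0 ≤ v) : solve ec k = solve_alt ec k := by
  by_cases hlt : ec.sum + k < 0
  · unfold solve solve_alt
    simp [hlt]
  · rcases hpre with h | h
    · exact absurd h hlt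
    · rw [solveA_char ec k h hlt, solveB_char ec k hlt]

-- ===== VERDICT =====
theorem solve_spec : Claim_equal_solve := by
  intro ec k _ hpre
  unfold Pre_solve at hpre
  unfold Spec_solve
  exact pv_main ec k hpre
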